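-- pv_equiv track=rewrite | github.com/shaharharel/edit-rna-apobec | src/embedding/nucleotide.py | _max_run_length
-- ===== SOURCE A (Python) =====
-- def _max_run_length(seq: str) -> int:
--     """Find maximum run of identical nucleotides."""
--     if not seq:
--         return 0
--
--     max_run = 1
--     current_run = 1
--
--     for i in range(1, len(seq)):
--         if seq[i] == seq[i-1]:
--             current_run += 1
--             max_run = max(max_run, current_run)
--         else:
--             current_run = 1
--
--     return max_run
-- ===== SOURCE B (Python) =====
-- def _max_run_length(seq: str) -> int:
--     """Find maximum run of identical nucleotides (divide and conquer)."""
--     n = len(seq)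
--     if n <= 1:
--         return n
--     mid = n // 2
--     best = max(_max_run_length(seq[:mid]), _max_run_length(seq[mid:]))
--     if seq[mid - 1] == seq[mid]:
--         best = max(best, _suffix_run(seq[:mid]) + _prefix_run(seq[mid:]))
--     return best
--
--
-- def _prefix_run(s: str) -> int:
--     j = 1
--     while j < len(s) and s[j] == s[0]:
--         j += 1
--     return j
--
--
-- def _suffix_run(s: str) -> int:
--     return _prefix_run(s[::-1])
-- ===== Notes on version B (the rewrite author's own statement) =====
-- stated objective: alternative
-- what changed: Replaces A's single-pass adjacent-comparison loop with two running counters by a divide-and-conquer recursion: split the string in half, recurse on each half, and combine with the run crossing the midpoint (suffix run of the left half plus prefix run of the right half when the boundary characters match).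
import Mathlib
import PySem

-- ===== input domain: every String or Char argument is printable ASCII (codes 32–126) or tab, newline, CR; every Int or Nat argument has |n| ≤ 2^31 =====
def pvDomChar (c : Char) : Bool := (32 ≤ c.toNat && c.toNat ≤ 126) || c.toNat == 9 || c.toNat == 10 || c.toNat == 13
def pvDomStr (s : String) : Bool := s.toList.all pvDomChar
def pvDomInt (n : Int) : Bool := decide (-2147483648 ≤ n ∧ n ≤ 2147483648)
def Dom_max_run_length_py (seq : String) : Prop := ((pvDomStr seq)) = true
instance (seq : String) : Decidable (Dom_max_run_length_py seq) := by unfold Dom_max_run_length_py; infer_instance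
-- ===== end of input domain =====

-- B replaces A's single left-to-right loop with two running counters by a divide-and-conquer
-- recursion (split in half, recurse, combine with the run crossing the midpoint); same results.

-- ===== PORT A =====
-- the loop body: state (max_run, current_run), index i, access seq[i]/seq[i-1] (always in range here)
def stepA (l : List Char) (mc : Int × Int) (i : Int) : Int × Int :=
  if PySem.List.pyGetD l i ' ' = PySem.List.pyGetD l (i - 1) ' ' then
    (max mc.1 (mc.2 + 1), mc.2 + 1)
  else
    (mc.1, 1)

def max_run_length_py (seq : String) : Int :=
  if seq.toList = [] then 0
  else ((PySem.List.pyRange 1 (PySem.Str.len seq) 1).foldl (stepA seq.toList) (1, 1)).1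

-- ===== PORT B =====
-- _prefix_run: the while loop returns 1 + the number of leading chars of the tail equal to s[0]
def prefAux (c : Char) : List Char → Int
  | [] => 0
  | d :: t => if d = c then 1 + prefAux c t else 0

def prefRun : List Char → Int
  | [] => 1
  | c :: t => 1 + prefAux c t

-- _suffix_run(s) = _prefix_run(s[::-1])
def sufRun (l : List Char) : Int := prefRun l.reverse

-- _max_run_length, divide and conquer on the character list (strings ported as char lists)
def mrlAux (l : List Char) : Int :=
  if _h : l.length ≤ 1 then (l.length : Int)
  else
    let mid := l.length / 2
    let best := max (mrlAux (l.take mid)) (mrlAux (l.drop mid))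
    if PySem.List.pyGet? l ((mid : Int) - 1) = PySem.List.pyGet? l (mid : Int) then
      max best (sufRun (l.take mid) + prefRun (l.drop mid))
    else best
termination_by l.length
decreasing_by
  · simpa [List.length_take] using by omega
  · simpa [List.length_drop] using by omega

def max_run_length_py_alt (seq : String) : Int := mrlAux seq.toList

-- ===== PRECONDITION & SPEC =====
def Spec_max_run_length_py (seq : String) (out : Int) : Prop := out = max_run_length_py_alt seq
instance (seq : String) (out : Int) : Decidable (Spec_max_run_length_py seq out) := by unfold Spec_max_run_length_py; infer_instance

-- ===== CLAIM (what is proved, stated in full; the proofs are below) =====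
def Claim_equal_max_run_length_py : Prop := ∀ (seq : String), Dom_max_run_length_py seq → Spec_max_run_length_py seq (max_run_length_py seq)

-- ===== LEMMAS AND PROOFS =====

-- the list of maximal-run lengths of c :: t, current run of length k on char c
def runsAux (c : Char) (k : Int) : List Char → List Int
  | [] => [k]
  | d :: t => if d = c then runsAux c (k + 1) t else k :: runsAux d 1 t

-- last char of c :: t
def lastC (c : Char) : List Char → Char
  | [] => c
  | d :: t => lastC d t

-- length of the last run of c :: t, current run k
def lastVal (c : Char) (k : Int) : List Char → Int
  | [] => k
  | d :: t => if d = c then lastVal c (k + 1) t else lastVal d 1 t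

-- A's loop rewritten structurally over (previous char, remaining chars)
def loopA : Char → Int → Int → List Char → Int × Int
  | _, m, c, [] => (m, c)
  | prev, m, c, d :: t => if d = prev then loopA d (max m (c + 1)) (c + 1) t else loopA d m 1 t

lemma foldl_max_shift (l : List Int) (a b : Int) :
    l.foldl max (max a b) = max a (l.foldl max b) := by
  induction l generalizing b with
  | nil => simp
  | cons x t ih =>
    simp only [List.foldl_cons]
    rw [max_assoc, ih]

lemma foldl_max_absorb (l : List Int) (b : Int) (hb : 0 ≤ b) :
    l.foldl max b = max b (l.foldl max 0) := by
  have h := foldl_max_shift l b 0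
  have h0 : max b 0 = b := by omega
  rw [h0] at h
  exact h

lemma foldl_max_cons (x : Int) (l : List Int) :
    (x :: l).foldl max 0 = max x (l.foldl max 0) := by
  simp only [List.foldl_cons]
  have : max 0 x = max x 0 := by omega
  rw [this, foldl_max_shift]

lemma foldl_max_nonneg (l : List Int) : 0 ≤ l.foldl max 0 :=
  (PySem.List.le_foldl_max l 0).1

lemma le_foldl_max_runsAux (t : List Char) (p : Char) (k a : Int) :
    k ≤ (runsAux p k t).foldl max a := by
  induction t generalizing p k a with
  | nil => simp [runsAux]
  | cons d t ih =>
    by_cases h : d = p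
    · simp only [runsAux, if_pos h]
      exact le_trans (by omega) (ih p (k + 1) a)
    · simp only [runsAux, if_neg h, List.foldl_cons]
      exact le_trans (le_max_right a k) (PySem.List.le_foldl_max _ _).1

lemma prefAux_nonneg (c : Char) (t : List Char) : 0 ≤ prefAux c t := by
  induction t with
  | nil => simp [prefAux]
  | cons d t ih =>
    by_cases h : d = c
    · simp only [prefAux, if_pos h]; omega
    · simp [prefAux, if_neg h]

lemma lastVal_pos (t : List Char) (c : Char) (k : Int) (hk : 1 ≤ k) :
    1 ≤ lastVal c k t := by
  induction t generalizing c k with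
  | nil => simpa [lastVal]
  | cons d t ih =>
    by_cases h : d = c
    · simp only [lastVal, if_pos h]; exact ih c (k + 1) (by omega)
    · simp only [lastVal, if_neg h]; exact ih d 1 le_rfl

lemma runsAux_ne_nil (t : List Char) (c : Char) (k : Int) : runsAux c k t ≠ [] := by
  cases t with
  | nil => simp [runsAux]
  | cons d t =>
    by_cases h : d = c
    · simp only [runsAux, if_pos h]; exact runsAux_ne_nil t c (k + 1)
    · simp [runsAux, if_neg h]

-- shifting the running count only shifts the first run
lemma runsAux_shift (t : List Char) (c : Char) (k : Int) :
    runsAux c k t = (k + prefAux c t) :: (runsAux c 1 t).tail := by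
  induction t generalizing c k with
  | nil => simp [runsAux, prefAux]
  | cons d t ih =>
    by_cases h : d = c
    · simp only [runsAux, prefAux, if_pos h]
      rw [ih c (k + 1), ih c (1 + 1)]
      simp only [List.tail_cons]
      congr 1
      omega
    · simp [runsAux, prefAux, if_neg h]

-- the run list ends with the last run
lemma runsAux_concat (t : List Char) (c : Char) (k : Int) :
    runsAux c k t = (runsAux c k t).dropLast ++ [lastVal c k t] := by
  induction t generalizing c k with
  | nil => simp [runsAux, lastVal]
  | cons d t ih =>
    by_cases h : d = c
    · simp only [runsAux, lastVal, if_pos h]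
      exact ih c (k + 1)
    · simp only [runsAux, lastVal, if_neg h]
      rw [List.dropLast_cons_of_ne_nil (runsAux_ne_nil t d 1), List.cons_append]
      exact congrArg (k :: ·) (ih d 1)

lemma lastVal_concat (t : List Char) (c e : Char) (k : Int) :
    lastVal c k (t ++ [e]) = if e = lastC c t then lastVal c k t + 1 else 1 := by
  induction t generalizing c k with
  | nil => simp [lastVal, lastC]
  | cons d t ih =>
    by_cases h : d = c
    · simp only [List.cons_append, lastVal, lastC, if_pos h]
      subst h
      exact ih d (k + 1)
    · simp only [List.cons_append, lastVal, lastC, if_neg h]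
      exact ih d 1

lemma lastC_eq_getLast? (t : List Char) (c : Char) : (c :: t).getLast? = some (lastC c t) := by
  induction t generalizing c with
  | nil => simp [lastC]
  | cons d t ih => simpa [lastC] using ih d

-- _suffix_run computes the length of the last run
lemma sufRun_eq_lastVal (t : List Char) (c : Char) :
    sufRun (c :: t) = lastVal c 1 t := by
  induction t using List.reverseRecOn generalizing c with
  | nil => simp [sufRun, prefRun, prefAux, lastVal]
  | append_singleton t e ih =>
    have hrev : (c :: (t ++ [e])).reverse = e :: (c :: t).reverse := by simp
    have hhead : (c :: t).reverse = lastC c t :: ((c :: t).reverse).tail := by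
      have h1 : ((c :: t).reverse).head? = some (lastC c t) := by
        rw [List.head?_reverse, lastC_eq_getLast?]
      cases hr : (c :: t).reverse with
      | nil => simp [hr] at h1
      | cons x s => rw [hr] at h1; simp at h1; simp [h1]
    rw [sufRun, hrev, lastVal_concat, prefRun, hhead]
    by_cases h : e = lastC c t
    · rw [if_pos h]
      subst h
      rw [prefAux, if_pos rfl]
      have := ih c
      rw [sufRun, hhead, prefRun] at this
      omega
    · rw [if_neg h, prefAux, if_neg (fun he => h he.symm)]
      omega

-- run lists concatenate, merging the boundary runs when the boundary chars agree
lemma runsAux_append (t : List Char) (c : Char) (k : Int) (d : Char) (r' : List Char) :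
    runsAux c k (t ++ d :: r') =
      if lastC c t = d
      then (runsAux c k t).dropLast ++ runsAux d (lastVal c k t + 1) r'
      else runsAux c k t ++ runsAux d 1 r' := by
  induction t generalizing c k with
  | nil =>
    simp only [List.nil_append, runsAux, lastC, lastVal]
    by_cases h : c = d
    · subst h; simp
    · rw [if_neg (fun he => h he.symm), if_neg h]
      simp
  | cons e t ih =>
    by_cases h : e = c
    · simp only [List.cons_append, runsAux, lastC, lastVal, if_pos h]
      subst h
      exact ih e (k + 1)
    · simp only [List.cons_append, runsAux, lastC, lastVal, if_neg h]
      rw [ih e 1]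
      by_cases hc : lastC e t = d
      · rw [if_pos hc, if_pos hc,
          List.dropLast_cons_of_ne_nil (runsAux_ne_nil t e 1), List.cons_append]
      · rw [if_neg hc, if_neg hc]

-- the maximum over the merged run list, in terms of both halves
lemma foldl_runsAux_append (t : List Char) (c : Char) (d : Char) (r' : List Char) :
    (runsAux c 1 (t ++ d :: r')).foldl max 0 =
      if lastC c t = d
      then max (max ((runsAux c 1 t).foldl max 0) ((runsAux d 1 r').foldl max 0))
               (lastVal c 1 t + (1 + prefAux d r'))
      else max ((runsAux c 1 t).foldl max 0) ((runsAux d 1 r').foldl max 0) := by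
  have hDL : 0 ≤ (runsAux c 1 t).dropLast.foldl max 0 := foldl_max_nonneg _
  have hT : 0 ≤ ((runsAux d 1 r').tail).foldl max 0 := foldl_max_nonneg _
  have hsL : 1 ≤ lastVal c 1 t := lastVal_pos t c 1 le_rfl
  have hpA : 0 ≤ prefAux d r' := prefAux_nonneg d r'
  have hML : (runsAux c 1 t).foldl max 0
      = max ((runsAux c 1 t).dropLast.foldl max 0) (lastVal c 1 t) := by
    conv_lhs => rw [runsAux_concat t c 1]
    rw [List.foldl_append, foldl_max_absorb _ _ hDL]
    simp only [List.foldl_cons, List.foldl_nil]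
    omega
  have hMR : (runsAux d 1 r').foldl max 0
      = max (1 + prefAux d r') (((runsAux d 1 r').tail).foldl max 0) := by
    conv_lhs => rw [runsAux_shift r' d 1]
    rw [foldl_max_cons]
  rw [runsAux_append t c 1 d r']
  by_cases h : lastC c t = d
  · rw [if_pos h, if_pos h, List.foldl_append, foldl_max_absorb _ _ hDL,
      runsAux_shift r' d (lastVal c 1 t + 1), foldl_max_cons, hML, hMR]
    omega
  · rw [if_neg h, if_neg h, List.foldl_append,
      foldl_max_absorb _ _ (foldl_max_nonneg _), hML, hMR]

-- B computes the maximum over the run list (strong induction on the length)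
lemma mrlAux_eq_foldl_runs : ∀ (n : Nat) (l : List Char), l.length = n →
    mrlAux l = (match l with | [] => ([] : List Int) | c :: t => runsAux c 1 t).foldl max 0 := by
  intro n
  induction n using Nat.strong_induction_on with
  | _ n ih =>
    intro l hl
    rw [mrlAux]
    by_cases h1 : l.length ≤ 1
    · rw [dif_pos h1]
      match l with
      | [] => simp
      | [c] => simp [runsAux]
      | c :: d :: t => simp at h1
    · rw [dif_neg h1]
      have hlen2 : 2 ≤ l.length := by omega
      have hmid1 : 1 ≤ l.length / 2 := by omega
      have hmidlt : l.length / 2 < l.length := by omega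
      obtain ⟨c, t, hL⟩ : ∃ c t, l.take (l.length / 2) = c :: t := by
        cases hT : l.take (l.length / 2) with
        | nil => have := congrArg List.length hT; simp only [List.length_take, List.length_nil] at this; omega
        | cons c t => exact ⟨c, t, rfl⟩
      obtain ⟨d, r', hR⟩ : ∃ d r', l.drop (l.length / 2) = d :: r' := by
        cases hT : l.drop (l.length / 2) with
        | nil => have := congrArg List.length hT; simp only [List.length_drop, List.length_nil] at this; omega
        | cons d r' => exact ⟨d, r', rfl⟩
      have hsplit : l = c :: (t ++ d :: r') := by
        conv_lhs => rw [← List.take_append_drop (l.length / 2) l]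
        rw [hL, hR, List.cons_append]
      have hLlen : (c :: t).length = l.length / 2 := by
        rw [← hL, List.length_take]; omega
      -- the two boundary accesses
      have hcond : PySem.List.pyGet? l ((l.length / 2 : Nat) - 1) = some (lastC c t) := by
        have hcast : ((l.length / 2 : Nat) : Int) - 1 = (((l.length / 2 - 1 : Nat)) : Int) := by
          omega
        rw [hcast, PySem.List.pyGet?_natCast,
          ← List.getElem?_take_of_lt (j := l.length / 2) (by omega), hL]
        have h2 : l.length / 2 - 1 = (c :: t).length - 1 := by rw [hLlen]
        rw [h2, ← List.getLast?_eq_getElem?, lastC_eq_getLast?]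
      have hcond2 : PySem.List.pyGet? l ((l.length / 2 : Nat)) = some d := by
        rw [PySem.List.pyGet?_natCast, ← List.head?_drop, hR]
        rfl
      have hiL := ih (l.length / 2) (by omega) (l.take (l.length / 2)) (by rw [List.length_take]; omega)
      have hiR := ih (l.length - l.length / 2) (by omega) (l.drop (l.length / 2)) (by rw [List.length_drop])
      rw [hL] at hiL
      rw [hR] at hiR
      simp only at hiL hiR
      -- rewrite the goal's match via hsplit
      conv_rhs => rw [hsplit]
      simp only
      rw [foldl_runsAux_append t c d r', hL, hR, hiL, hiR, hcond, hcond2,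
        sufRun_eq_lastVal, prefRun]
      by_cases h : lastC c t = d
      · rw [if_pos h, if_pos (by rw [h])]
      · rw [if_neg h, if_neg (fun he => h (Option.some.inj he))]

lemma loopA_eq_runsAux (t : List Char) (p : Char) (m c : Int)
    (h1 : 1 ≤ c) (h2 : c ≤ m) :
    (loopA p m c t).1 = max m ((runsAux p c t).foldl max 0) := by
  induction t generalizing p m c with
  | nil =>
    simp only [loopA, runsAux, List.foldl_cons, List.foldl_nil]
    omega
  | cons d t ih =>
    by_cases h : d = p
    · subst h
      simp only [loopA, runsAux, reduceIte]
      rw [ih d (max m (c + 1)) (c + 1) (by omega) (le_max_right _ _)]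
      have hge := le_foldl_max_runsAux t d (c + 1) (0 : Int)
      omega
    · simp only [loopA, runsAux, if_neg h, List.foldl_cons]
      rw [ih d m 1 le_rfl (by omega)]
      have : (max 0 c) = max 0 (max c 0) := by omega
      rw [this, foldl_max_shift, foldl_max_shift]
      have hge : (0 : Int) ≤ (runsAux d 1 t).foldl max 0 :=
        le_trans (by omega) (le_foldl_max_runsAux t d 1 0)
      omega

-- A's indexed fold over range(k+1, len l) equals loopA on the suffix after index k
lemma foldA_eq_loopA (l : List Char) (rest : List Char) (prev : Char) (k : Nat) (m c : Int)
    (hk : l.drop k = prev :: rest) :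
    (PySem.List.pyRange ((k : Int) + 1) (l.length : Int) 1).foldl (stepA l) (m, c)
      = loopA prev m c rest := by
  induction rest generalizing k m c prev with
  | nil =>
    have hlen : l.length = k + 1 := by
      have := congrArg List.length hk
      simp at this
      omega
    rw [PySem.List.pyRange_one_eq_nil (by omega)]
    simp [loopA]
  | cons d t ih =>
    have hlen : k + 2 ≤ l.length := by
      have := congrArg List.length hk
      simp at this
      omega
    have hk1 : l.drop (k + 1) = d :: t := by
      have := congrArg List.tail hk
      simpa [List.tail_drop] using this
    have hgk : l[k]? = some prev := by
      rw [← List.head?_drop, hk]; rfl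
    have hgk1 : l[k + 1]? = some d := by
      rw [← List.head?_drop, hk1]; rfl
    rw [PySem.List.pyRange_one_cons (by omega)]
    simp only [List.foldl_cons]
    have hget : PySem.List.pyGetD l ((k : Int) + 1) ' ' = d := by
      have : ((k : Int) + 1) = ((k + 1 : Nat) : Int) := by push_cast; omega
      rw [this, PySem.List.pyGetD_natCast]
      simp [List.getD, hgk1]
    have hget' : PySem.List.pyGetD l ((k : Int) + 1 - 1) ' ' = prev := by
      have : ((k : Int) + 1 - 1) = ((k : Nat) : Int) := by omega
      rw [this, PySem.List.pyGetD_natCast]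
      simp [List.getD, hgk]
    have hsucc : (k : Int) + 1 + 1 = ((k + 1 : Nat) : Int) + 1 := by omega
    by_cases h : d = prev
    · rw [show stepA l (m, c) ((k : Int) + 1)
            = (max m (c + 1), c + 1) by unfold stepA; rw [hget, hget', if_pos h]]
      rw [hsucc, ih d (k + 1) _ _ hk1]
      simp [loopA, h]
    · rw [show stepA l (m, c) ((k : Int) + 1)
            = (m, 1) by unfold stepA; rw [hget, hget', if_neg h]]
      rw [hsucc, ih d (k + 1) _ _ hk1]
      simp [loopA, h]

-- ===== VERDICT (by name: the statement is the Claim_ definition above) =====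
theorem max_run_length_py_spec : Claim_equal_max_run_length_py := by
  intro seq _
  unfold Spec_max_run_length_py
  rw [max_run_length_py_alt, mrlAux_eq_foldl_runs seq.toList.length seq.toList rfl]
  cases hl : seq.toList with
  | nil => simp [max_run_length_py, hl]
  | cons c t =>
    have hA : max_run_length_py seq = (loopA c 1 1 t).1 := by
      rw [max_run_length_py, hl, if_neg (List.cons_ne_nil c t)]
      have hlen : PySem.Str.len seq = (((c :: t).length : Nat) : Int) := by
        simp [PySem.Str.len_eq, hl]
      rw [hlen]
      have hb := foldA_eq_loopA (c :: t) t c 0 1 1 (by simp)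
      norm_num at hb
      rw [show (((c :: t).length : Nat) : Int) = (t.length : Int) + 1 by simp, hb]
    rw [hA, loopA_eq_runsAux t c 1 1 le_rfl le_rfl]
    simp only
    have := le_foldl_max_runsAux t c 1 (0 : Int)
    omega
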